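-- pv_equiv track=rewrite | github.com/sashaaero/binarysearch-problems | problems/hard/parity_jump.py | solve
-- ===== SOURCE A (Python) =====
-- from collections import deque
--
-- def solve(nums):
--     size = len(nums)
--     r = []
--     for i, n in enumerate(nums):
--         parity = n % 2
--         d = deque([(i + n, 1), (i - n, 1)])
--         seen = {i + n, i - n}
--         while d:
--             idx, step = d.popleft()
--             if not 0 <= idx < size: continue
--             num = nums[idx]
--             if num % 2 != parity:
--                 r.append(step)
--                 break
--             if idx + num not in seen:
--                 d.append((idx + num, step + 1))
--                 seen.add(idx + num)
--             if idx - num not in seen: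
--                 d.append((idx - num, step + 1))
--                 seen.add(idx - num)
--         else:
--             r.append(-1)
--
--     return r
-- ===== SOURCE B (Python) =====
-- def solve(nums):
--     # Reverse multi-source round relaxation: for each target parity q, settle the
--     # whole array level by level starting from the indices whose value has parity q;
--     # an index's answer is the round in which it gets settled (or -1 if never).
--     n = len(nums)
--     res = {}
--     for q in (0, 1):
--         settled = {i for i in range(n) if nums[i] % 2 == q}
--         pending = [i for i in range(n) if nums[i] % 2 != q]
--         d = 0
--         while pending:
--             d += 1
--             newly = [i for i in pending
--                      if (0 <= i + nums[i] < n and i + nums[i] in settled)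
--                      or (0 <= i - nums[i] < n and i - nums[i] in settled)]
--             if not newly:
--                 break
--             for i in newly:
--                 res[i] = d
--             settled |= set(newly)
--             pending = [i for i in pending if i not in settled]
--     return [res.get(i, -1) for i in range(n)]
-- ===== Notes on version B (the rewrite author's own statement) =====
-- stated objective: alternative
-- what changed: Replaces A's per-start forward BFS (deque of (index,step) pairs with a visited set, run once for every index) by a global reverse multi-source level relaxation: for each target parity q, all indices whose value has parity q are settled at level 0 and the remaining indices are settled round by round when one of their two jump targets is already settled; the answer of an index is the round at which it is settled (-1 if never), so all answers are produced by two shared sweeps instead of n independent searches.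
import Mathlib
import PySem

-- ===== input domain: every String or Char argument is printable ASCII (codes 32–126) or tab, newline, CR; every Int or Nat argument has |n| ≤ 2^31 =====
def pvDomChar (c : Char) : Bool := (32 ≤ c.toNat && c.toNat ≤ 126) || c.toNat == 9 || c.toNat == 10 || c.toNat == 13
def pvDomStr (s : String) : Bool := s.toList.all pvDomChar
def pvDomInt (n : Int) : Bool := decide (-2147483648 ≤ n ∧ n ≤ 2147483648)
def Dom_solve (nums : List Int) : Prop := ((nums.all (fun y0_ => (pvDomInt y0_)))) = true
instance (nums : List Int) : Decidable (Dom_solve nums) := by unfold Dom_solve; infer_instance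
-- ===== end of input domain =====

-- B replaces A's per-start forward BFS (deque + seen set, one search per index) by a global
-- reverse multi-source level relaxation: per target parity, indices are settled round by round
-- from the opposite-parity indices, and an index's answer is the round at which it settles.


-- ===== PORT A =====
-- A's inner while-loop over the deque `d` of (idx, step) pairs; popleft = head, append = ++ [·].
-- The fuel argument only makes the recursion structural (the loop makes at most 3*len(nums)+8
-- iterations, each pop being matched by an earlier seen-guarded enqueue); the `none` arm of
-- pyGet? is unreachable (idx was bounds-checked, as in the Python).
def solveBFS (nums : List Int) (size parity : Int) : Nat → List (Int × Int) → PySem.Set Int → Int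
  | _, [], _ => -1
  | 0, _ :: _, _ => -1
  | f + 1, (idx, step) :: rest, seen =>
    if ¬ (0 ≤ idx ∧ idx < size) then solveBFS nums size parity f rest seen
    else
      match PySem.List.pyGet? nums idx with
      | none => -1
      | some num =>
        if PySem.Int.mod num 2 ≠ parity then step
        else
          let p1 := if (idx + num) ∈ seen then (rest, seen)
                    else (rest ++ [(idx + num, step + 1)], PySem.Set.add seen (idx + num))
          let p2 := if (idx - num) ∈ p1.2 then p1
                    else (p1.1 ++ [(idx - num, step + 1)], PySem.Set.add p1.2 (idx - num))
          solveBFS nums size parity f p2.1 p2.2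

def solve (nums : List Int) : List Int :=
  let size : Int := nums.length
  (PySem.List.enumerate nums).foldl
    (fun r p =>
      let i := p.1
      let n := p.2
      let parity := PySem.Int.mod n 2
      r ++ [solveBFS nums size parity (3 * nums.length + 8)
              [(i + n, 1), (i - n, 1)] (PySem.Set.ofList [i + n, i - n])])
    []

-- ===== PORT B =====
-- `settled |= set(newly)` as a fold of Set.add; this membership fact is what the
-- termination argument of solveRound cites.
lemma pv_mem_foldl_set_add (l : List Int) (s : PySem.Set Int) (x : Int) (hx : x ∈ l ∨ x ∈ s) :
    x ∈ l.foldl (fun s i => PySem.Set.add s i) s := by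
  induction l generalizing s with
  | nil => simpa using hx.resolve_left (by simp)
  | cons a t ih =>
    simp only [List.foldl_cons]
    rcases hx with h | h
    · rcases List.mem_cons.mp h with rfl | h
      · exact ih _ (Or.inr (by simp [PySem.Set.mem_add]))
      · exact ih _ (Or.inl h)
    · exact ih _ (Or.inr (by simp [PySem.Set.mem_add, h]))

-- the membership test of `newly`: one of the two jump targets of i is in bounds and settled
-- (nums[i] ported via pyGet?.getD 0: i is a valid index wherever B evaluates it, so this is exact)
def jumpSettled (nums : List Int) (n : Int) (settled : PySem.Set Int) (i : Int) : Bool :=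
  let v := (PySem.List.pyGet? nums i).getD 0
  (decide (0 ≤ i + v) && decide (i + v < n) && decide ((i + v) ∈ settled)) ||
  (decide (0 ≤ i - v) && decide (i - v < n) && decide ((i - v) ∈ settled))

-- B's `while pending:` loop; terminates because `pending` strictly shrinks whenever
-- `newly` is nonempty (its members enter `settled` and are filtered out).
def solveRound (nums : List Int) (n : Int) (pending : List Int) (settled : PySem.Set Int)
    (res : PySem.Dict Int Int) (d : Int) : PySem.Dict Int Int :=
  if hp : pending = [] then res
  else
    let newly := pending.filter (jumpSettled nums n settled)
    if hn : newly = [] then res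
    else
      let res' := newly.foldl (fun r i => PySem.Dict.insert r i (d + 1)) res
      let settled' := newly.foldl (fun s i => PySem.Set.add s i) settled
      solveRound nums n (pending.filter (fun i => !decide (i ∈ settled'))) settled' res' (d + 1)
  termination_by pending.length
  decreasing_by
    simp only [List.length_unattach]
    rw [← List.length_attach (l := pending)]
    apply List.length_filter_lt_length_iff_exists.mpr
    rcases List.exists_mem_of_ne_nil _ hn with ⟨x, hx⟩
    obtain ⟨hxp, hfil⟩ := List.mem_unattach.mp hx
    refine ⟨⟨x, hxp⟩, List.mem_attach _ _, ?_⟩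
    have hx' : x ∈ List.filter (jumpSettled nums n settled) pending :=
      List.mem_filter.mpr ⟨hxp, (List.mem_filter.mp hfil).2⟩
    simpa using pv_mem_foldl_set_add _ settled x (Or.inl hx')

def solve_alt (nums : List Int) : List Int :=
  let n : Int := nums.length
  let res := [(0 : Int), 1].foldl
    (fun res q =>
      let settled := PySem.Set.ofList ((PySem.List.pyRange 0 n 1).filter
        (fun i => PySem.Int.mod ((PySem.List.pyGet? nums i).getD 0) 2 == q))
      let pending := (PySem.List.pyRange 0 n 1).filter
        (fun i => PySem.Int.mod ((PySem.List.pyGet? nums i).getD 0) 2 != q)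
      solveRound nums n pending settled res 0)
    (PySem.Dict.mk [])
  (PySem.List.pyRange 0 n 1).map (fun i => (PySem.Dict.get? res i).getD (-1))

-- ===== PRECONDITION & SPEC =====
def Spec_solve (nums : List Int) (out : List Int) : Prop := out = solve_alt nums
instance (nums : List Int) (out : List Int) : Decidable (Spec_solve nums out) := by
  unfold Spec_solve; infer_instance

-- ===== CLAIM (what is proved, stated in full; the proofs are below) =====
def Claim_equal_solve : Prop := ∀ (nums : List Int), Dom_solve nums → Spec_solve nums (solve nums)

-- ===== LEMMAS AND PROOFS =====

-- ---------- proof-side reference notions: bounds, value, parity-target paths ----------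

-- nums[x] (defaulted; only read where x is in bounds)
def pvVal (nums : List Int) (x : Int) : Int := (PySem.List.pyGet? nums x).getD 0

def pvInB (nums : List Int) (x : Int) : Bool :=
  decide (0 ≤ x) && decide (x < (nums.length : Int))

-- a node of the jump graph whose value has parity ≠ p (a "target" for starts of parity p)
def pvTgt (nums : List Int) (p x : Int) : Bool :=
  pvInB nums x && (PySem.Int.mod (pvVal nums x) 2 != p)

-- an in-bounds node of parity p (the only nodes A's BFS expands)
def pvExp (nums : List Int) (p x : Int) : Bool :=
  pvInB nums x && (PySem.Int.mod (pvVal nums x) 2 == p)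

-- pvPath s x: there is a jump path of length s from x to a target whose inner nodes all have parity p
def pvPath (nums : List Int) (p : Int) : Nat → Int → Bool
  | 0, x => pvTgt nums p x
  | s+1, x => pvExp nums p x &&
      (pvPath nums p s (x + pvVal nums x) || pvPath nums p s (x - pvVal nums x))

-- the monotone closure pvR d x = "some path of length ≤ d"
def pvR (nums : List Int) (p : Int) (d : Nat) (x : Int) : Bool :=
  (List.range (d+1)).any (fun s => pvPath nums p s x)

-- the answer contributed by a BFS queue state: front carries tag `step`, nxt tag `step+1`
def pvHit (nums : List Int) (p : Int) (front nxt : List Int) (m : Nat) : Bool :=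
  front.any (pvPath nums p m) ||
  (match m with | 0 => false | s+1 => nxt.any (pvPath nums p s))

-- fuel potential: 3 per expandable queue entry / unseen expandable index, 1 otherwise
def pvC (nums : List Int) (p x : Int) : Nat := if pvExp nums p x then 3 else 1
def pvEun (nums : List Int) (p : Int) (seen : List Int) : Nat :=
  ((List.range nums.length).filter
    (fun (k : Nat) => pvExp nums p (k : Int) && !decide ((k : Int) ∈ seen))).length
def pvPhi (nums : List Int) (p : Int) (front nxt seen : List Int) : Nat :=
  (front.map (pvC nums p)).sum + (nxt.map (pvC nums p)).sum + 3 * pvEun nums p seen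

-- ---------- level-synchronous restatement of A's deque loop ----------
-- Same code as solveBFS with the queue split at the tag boundary (front at `step`,
-- nxt at `step+1`); proved equal in pv_bfs_bisim below.
def layerBFS (nums : List Int) (size parity : Int) :
    Nat → List Int → List Int → PySem.Set Int → Int → Int
  | fuel, [], nxt, seen, step =>
      if nxt.isEmpty then -1 else layerBFS nums size parity fuel nxt [] seen (step + 1)
  | 0, _ :: _, _, _, _ => -1
  | fuel + 1, idx :: front, nxt, seen, step =>
      if ¬ (0 ≤ idx ∧ idx < size) then layerBFS nums size parity fuel front nxt seen step
      else
        match PySem.List.pyGet? nums idx with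
        | none => -1
        | some num =>
          if PySem.Int.mod num 2 ≠ parity then step
          else
            let q1 := if (idx + num) ∈ seen then (nxt, seen)
                      else (nxt ++ [idx + num], PySem.Set.add seen (idx + num))
            let q2 := if (idx - num) ∈ q1.2 then q1
                      else (q1.1 ++ [idx - num], PySem.Set.add q1.2 (idx - num))
            layerBFS nums size parity fuel front q2.1 q2.2 step
  termination_by fuel front => (fuel, if front.isEmpty then 1 else 0)
  decreasing_by
    · apply Prod.Lex.right
      simp_all [List.isEmpty_iff]
    · apply Prod.Lex.left; omega
    · apply Prod.Lex.left; omega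

-- lock-step bisimulation between A's tagged deque and the level-synchronous loop
lemma pv_bfs_bisim (nums : List Int) (size parity : Int) :
    ∀ (fuel : Nat) (front nxt : List Int) (seen : PySem.Set Int) (step : Int),
      solveBFS nums size parity fuel
        (front.map (fun x => (x, step)) ++ nxt.map (fun x => (x, step + 1))) seen
        = layerBFS nums size parity fuel front nxt seen step := by
  intro fuel front nxt seen step
  fun_induction layerBFS nums size parity fuel front nxt seen step with
  | case1 fuel nxt seen step h =>
    simp only [List.isEmpty_iff] at h
    subst h
    simp [solveBFS]
  | case2 fuel nxt seen step h ih =>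
    simpa using ih
  | case3 front nxt seen step =>
    simp [solveBFS]
  | case4 fuel idx front nxt seen step hout ih =>
    simp only [List.map_cons, List.cons_append]
    rw [solveBFS.eq_3, if_pos hout]
    exact ih
  | case5 fuel idx front nxt seen step hout hget =>
    simp only [List.map_cons, List.cons_append]
    rw [solveBFS.eq_3, if_neg hout]
    simp [hget]
  | case6 fuel idx front nxt seen step hout num hget hpar =>
    simp only [List.map_cons, List.cons_append]
    rw [solveBFS.eq_3, if_neg hout]
    simp only [hget]
    rw [if_pos hpar]
  | case7 fuel idx front nxt seen step hout num hget hpar q1 q2 ih =>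
    simp only [List.map_cons, List.cons_append]
    rw [solveBFS.eq_3, if_neg hout]
    simp only [hget]
    rw [if_neg hpar, ← ih]
    simp only [q2, q1]
    by_cases h1 : (idx + num) ∈ seen <;>
      by_cases h2 : (idx - num) ∈ (if (idx + num) ∈ seen then (nxt, seen)
        else (nxt ++ [idx + num], PySem.Set.add seen (idx + num))).2 <;>
      simp_all [List.append_assoc]

-- ---------- basic facts ----------

lemma pvPath_inB (nums : List Int) (p : Int) :
    ∀ (s : Nat) (x : Int), pvPath nums p s x = true → pvInB nums x = true := by
  intro s x h
  cases s with
  | zero => exact (Bool.and_eq_true_iff.mp h).1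
  | succ s =>
    simp only [pvPath, Bool.and_eq_true_iff, pvExp] at h
    exact h.1.1

lemma pvMod2_cases (v : Int) : PySem.Int.mod v 2 = 0 ∨ PySem.Int.mod v 2 = 1 := by
  have h1 := PySem.Int.mod_nonneg v (b := 2) (by norm_num)
  have h2 := PySem.Int.mod_lt v (b := 2) (by norm_num)
  omega

-- ---------- dite/Nat.find comparison helpers ----------

lemma pv_dite_eq_of (P Q : Nat → Bool) (hQP : ∀ m, Q m = true → P m = true)
    (hPQ : ∀ m, P m = true → ∃ m' ≤ m, Q m' = true) (step : Int) :
    (@dite Int (∃ m, P m = true) (Classical.dec _)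
      (fun h => step + (Nat.find h : Int)) (fun _ => -1)) =
    (@dite Int (∃ m, Q m = true) (Classical.dec _)
      (fun h => step + (Nat.find h : Int)) (fun _ => -1)) := by
  by_cases hP : ∃ m, P m = true
  · obtain ⟨m', hle, hq⟩ := hPQ _ (Nat.find_spec hP)
    have hQ : ∃ m, Q m = true := ⟨m', hq⟩
    rw [dif_pos hP, dif_pos hQ]
    have h1 : Nat.find hQ ≤ Nat.find hP := le_trans (Nat.find_le hq) hle
    have h2 : Nat.find hP ≤ Nat.find hQ := Nat.find_le (hQP _ (Nat.find_spec hQ))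
    have : Nat.find hP = Nat.find hQ := le_antisymm h2 h1
    rw [this]
  · have hQ : ¬ ∃ m, Q m = true := fun ⟨m, hq⟩ => hP ⟨m, hQP m hq⟩
    rw [dif_neg hP, dif_neg hQ]

lemma pv_dite_shift (P Q : Nat → Bool) (h0 : P 0 = false) (hs : ∀ m, P (m + 1) = Q m)
    (step : Int) :
    (@dite Int (∃ m, P m = true) (Classical.dec _)
      (fun h => step + (Nat.find h : Int)) (fun _ => -1)) =
    (@dite Int (∃ m, Q m = true) (Classical.dec _)
      (fun h => (step + 1) + (Nat.find h : Int)) (fun _ => -1)) := by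
  by_cases hQ : ∃ m, Q m = true
  · have hP : ∃ m, P m = true := ⟨Nat.find hQ + 1, by rw [hs]; exact Nat.find_spec hQ⟩
    rw [dif_pos hP, dif_pos hQ]
    have h1 : Nat.find hP ≤ Nat.find hQ + 1 := Nat.find_le (by rw [hs]; exact Nat.find_spec hQ)
    have h2 : Nat.find hQ + 1 ≤ Nat.find hP := by
      rcases hfp : Nat.find hP with _ | t
      · have := Nat.find_spec hP; rw [hfp, h0] at this; cases this
      · have : Q t = true := by
          have h := Nat.find_spec hP
          rw [hfp, hs] at h
          exact h
        have hle := Nat.find_le (h := hQ) this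
        omega
    have : Nat.find hP = Nat.find hQ + 1 := le_antisymm h1 h2
    rw [this]
    push_cast
    ring
  · have hP : ¬ ∃ m, P m = true := by
      rintro ⟨m, hm⟩
      rcases m with _ | s
      · rw [h0] at hm; cases hm
      · exact hQ ⟨s, by rw [← hs]; exact hm⟩
    rw [dif_neg hP, dif_neg hQ]

-- ---------- fuel potential bookkeeping ----------

lemma pv_filter_erase (A B : Nat → Bool) (k₀ : Nat) :
    ∀ (l : List Nat), l.Nodup → k₀ ∈ l → A k₀ = true → B k₀ = false →
    (∀ k, k ≠ k₀ → B k = A k) →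
    (l.filter B).length + 1 = (l.filter A).length := by
  intro l
  induction l with
  | nil => intro _ h; cases h
  | cons a t ih =>
    intro hnd hmem hA hB hcong
    rcases List.mem_cons.mp hmem with hEq | hmem
    · have hnotin : a ∉ t := (List.nodup_cons.mp hnd).1
      have hfA : A a = true := hEq ▸ hA
      have hfB : B a = false := hEq ▸ hB
      have : t.filter B = t.filter A := by
        apply List.filter_congr
        intro k hk
        apply hcong k
        intro h
        rw [h, hEq] at hk
        exact hnotin hk
      simp [hfA, hfB, this]
    · have hne : a ≠ k₀ := by
        intro h
        rw [← h] at hmem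
        exact (List.nodup_cons.mp hnd).1 hmem
      have hBA : B a = A a := hcong a hne
      rcases ha : A a
      · have : B a = false := by rw [hBA, ha]
        simp only [List.filter_cons, this, ha, Bool.false_eq_true, if_neg]
        exact ih (List.nodup_cons.mp hnd).2 hmem hA hB hcong
      · have : B a = true := by rw [hBA, ha]
        simp only [List.filter_cons, this, ha, if_pos]
        simp only [List.length_cons]
        have := ih (List.nodup_cons.mp hnd).2 hmem hA hB hcong
        omega

lemma pvInB_toNat (nums : List Int) (x : Int) (h : pvInB nums x = true) :
    x.toNat < nums.length ∧ (x.toNat : Int) = x := by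
  simp only [pvInB, Bool.and_eq_true_iff, decide_eq_true_eq] at h
  omega

lemma pvEun_add_exp (nums : List Int) (p : Int) (seen : List Int) (e : Int)
    (he : pvExp nums p e = true) (hne : e ∉ seen) :
    pvEun nums p (PySem.Set.add seen e) + 1 = pvEun nums p seen := by
  have hinB : pvInB nums e = true := (Bool.and_eq_true_iff.mp he).1
  obtain ⟨hlt, hcast⟩ := pvInB_toNat nums e hinB
  simp only [pvEun]
  apply pv_filter_erase _ _ e.toNat _ List.nodup_range (List.mem_range.mpr hlt)
  · rw [hcast]
    simp [he, hne]
  · rw [hcast]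
    simp [PySem.Set.mem_add]
  · intro k hk
    have : ((k : Int) ∈ PySem.Set.add seen e) ↔ ((k : Int) ∈ seen) := by
      rw [PySem.Set.mem_add]
      constructor
      · rintro (h | h)
        · exact h
        · exact absurd (by omega : k = e.toNat) hk
      · exact Or.inl
    simp [this]

lemma pvEun_add_nonexp (nums : List Int) (p : Int) (seen : List Int) (e : Int)
    (he : pvExp nums p e = false) :
    pvEun nums p (PySem.Set.add seen e) = pvEun nums p seen := by
  simp only [pvEun]
  congr 1
  apply List.filter_congr
  intro k _
  by_cases hk : (k : Int) = e
  · rw [hk, he]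
    simp
  · have : ((k : Int) ∈ PySem.Set.add seen e) ↔ ((k : Int) ∈ seen) := by
      rw [PySem.Set.mem_add]
      exact ⟨fun h => h.resolve_right hk, Or.inl⟩
    simp [this]

lemma pvEun_le (nums : List Int) (p : Int) (seen : List Int) :
    pvEun nums p seen ≤ nums.length := by
  simp only [pvEun]
  exact le_trans (List.length_filter_le _ _) (by simp)

-- ---------- A side: correctness of the level-synchronous seen-set BFS ----------

-- any reachable-to-target node already recorded in `seen` is covered by the queue
lemma pv_descent (nums : List Int) (p : Int) (front nxt seen : List Int)
    (hC3 : ∀ y ∈ seen, pvExp nums p y = true →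
      y ∈ front ∨ y ∈ nxt ∨ ((y + pvVal nums y) ∈ seen ∧ (y - pvVal nums y) ∈ seen))
    (hC4 : ∀ y ∈ seen, pvTgt nums p y = true → y ∈ front ∨ y ∈ nxt) :
    ∀ (s : Nat) (c : Int), c ∈ seen → pvPath nums p s c = true →
      ∃ m ≤ s + 1, pvHit nums p front nxt m = true := by
  intro s
  induction s using Nat.strong_induction_on with
  | _ s ih =>
    intro c hc hp
    by_cases hf : c ∈ front
    · exact ⟨s, by omega, by
        simp only [pvHit, Bool.or_eq_true, List.any_eq_true]
        exact Or.inl ⟨c, hf, hp⟩⟩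
    by_cases hn : c ∈ nxt
    · exact ⟨s + 1, le_refl _, by
        simp only [pvHit, Bool.or_eq_true, List.any_eq_true]
        exact Or.inr ⟨c, hn, hp⟩⟩
    cases s with
    | zero =>
      rcases hC4 c hc hp with h | h
      · exact absurd h hf
      · exact absurd h hn
    | succ t =>
      simp only [pvPath, Bool.and_eq_true_iff, Bool.or_eq_true] at hp
      rcases hC3 c hc hp.1 with h | h | h
      · exact absurd h hf
      · exact absurd h hn
      · rcases hp.2 with hchild | hchild
        · obtain ⟨m, hm, hh⟩ := ih t (by omega) _ h.1 hchild
          exact ⟨m, by omega, hh⟩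
        · obtain ⟨m, hm, hh⟩ := ih t (by omega) _ h.2 hchild
          exact ⟨m, by omega, hh⟩

lemma pv_layer_main (nums : List Int) (p : Int) :
    ∀ (N fuel : Nat) (front nxt seen : List Int) (step : Int),
      2 * fuel + (if front = [] then 1 else 0) ≤ N →
      (∀ x ∈ front, x ∈ seen) → (∀ x ∈ nxt, x ∈ seen) →
      (∀ y ∈ seen, pvExp nums p y = true →
        y ∈ front ∨ y ∈ nxt ∨ ((y + pvVal nums y) ∈ seen ∧ (y - pvVal nums y) ∈ seen)) →
      (∀ y ∈ seen, pvTgt nums p y = true → y ∈ front ∨ y ∈ nxt) →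
      pvPhi nums p front nxt seen ≤ fuel →
      layerBFS nums (nums.length : Int) p fuel front nxt seen step =
        @dite Int (∃ m, pvHit nums p front nxt m = true) (Classical.dec _)
          (fun h => step + (Nat.find h : Int)) (fun _ => -1) := by
  intro N
  induction N using Nat.strong_induction_on with
  | _ N ih =>
    intro fuel front nxt seen step hN hC1 hC1' hC3 hC4 hfuel
    rcases front with _ | ⟨x, rest⟩
    · rcases hnx : nxt with _ | ⟨y, ys⟩
      · subst hnx
        rw [layerBFS.eq_1]
        simp only [List.isEmpty_nil, if_true]
        rw [dif_neg]
        rintro ⟨m, hm⟩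
        rcases m with _ | s <;> simp [pvHit] at hm
      · subst hnx
        rw [layerBFS.eq_1]
        have hne : (y :: ys).isEmpty = false := rfl
        rw [hne]
        simp only [Bool.false_eq_true, if_neg]
        have hmeas : 2 * fuel + (if (y :: ys) = ([] : List Int) then 1 else 0) ≤ 2 * fuel := by
          simp
        have hphi' : pvPhi nums p (y :: ys) [] seen ≤ fuel := by
          unfold pvPhi at hfuel ⊢
          simp only [List.map_nil, List.sum_nil] at hfuel ⊢
          omega
        have hNf : 2 * fuel + 1 ≤ N := by simpa using hN
        rw [ih (2 * fuel) (by omega) fuel (y :: ys) [] seen (step + 1)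
          hmeas hC1' (by simp)
          (fun z hz hze => by
            rcases hC3 z hz hze with h | h | h
            · cases h
            · exact Or.inl h
            · exact Or.inr (Or.inr h))
          (fun z hz hzt => by
            rcases hC4 z hz hzt with h | h
            · cases h
            · exact Or.inl h)
          hphi']
        exact (pv_dite_shift (fun m => pvHit nums p [] (y :: ys) m)
          (fun m => pvHit nums p (y :: ys) [] m) (by simp [pvHit])
          (fun m => by rcases m with _ | s <;> simp [pvHit]) step).symm
    · rcases fuel with _ | f
      · exfalso
        have h1 : 1 ≤ pvC nums p x := by unfold pvC; split <;> omega
        have h2 : pvC nums p x ≤ pvPhi nums p (x :: rest) nxt seen := by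
          simp only [pvPhi, List.map_cons, List.sum_cons]; omega
        omega
      · have hN' : 2 * (f + 1) ≤ N := by simpa using hN
        rw [layerBFS.eq_3]
        by_cases hin : (0 ≤ x ∧ x < (nums.length : Int))
        · rw [if_neg (not_not_intro hin)]
          have hInB : pvInB nums x = true := by
            simp only [pvInB, Bool.and_eq_true_iff, decide_eq_true_eq]; exact hin
          obtain ⟨hlt, hcast⟩ := pvInB_toNat nums x hInB
          have hget : PySem.List.pyGet? nums x = some nums[x.toNat] := by
            rw [PySem.List.pyGet?_of_nonneg nums hin.1]
            exact List.getElem?_eq_getElem hlt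
          have hval : pvVal nums x = nums[x.toNat] := by simp [pvVal, hget]
          simp only [hget]
          by_cases hpar : PySem.Int.mod nums[x.toNat] 2 ≠ p
          · rw [if_pos hpar]
            have htgt : pvTgt nums p x = true := by
              simp only [pvTgt, hInB, hval, Bool.true_and, bne_iff_ne, ne_eq,
                decide_eq_true_eq]
              exact hpar
            have hex : ∃ m, pvHit nums p (x :: rest) nxt m = true :=
              ⟨0, by simp [pvHit, pvPath, htgt]⟩
            rw [dif_pos hex, (Nat.find_eq_zero hex).mpr (by simp [pvHit, pvPath, htgt])]
            simp
          · rw [if_neg hpar]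
            have hparv : PySem.Int.mod nums[x.toNat] 2 = p := not_ne_iff.mp hpar
            have hparv' : nums[x.toNat] % 2 = p := by
              rw [← PySem.Int.mod_eq_emod_of_pos (a := nums[x.toNat]) (by norm_num)]
              exact hparv
            have hexp : pvExp nums p x = true := by
              simp [pvExp, hInB, hval, hparv, hparv']
            have htgtx : pvTgt nums p x = false := by
              simp [pvTgt, hval, hparv, hparv']
            have hpathx : ∀ s : Nat, pvPath nums p (s + 1) x =
                (pvPath nums p s (x + nums[x.toNat]) || pvPath nums p s (x - nums[x.toNat])) := by
              intro s
              simp [pvPath, hexp, hval]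
            set num := nums[x.toNat] with hnum
            have key : ∀ (nxt' seen' : List Int),
                (∀ y, y ∈ seen' ↔ (y ∈ seen ∨ y = x + num ∨ y = x - num)) →
                (∀ y ∈ nxt', y ∈ seen') →
                (∀ y ∈ nxt, y ∈ nxt') →
                (∀ y ∈ nxt', y ∈ nxt ∨ y = x + num ∨ y = x - num) →
                (∀ y, (y = x + num ∨ y = x - num) → y ∉ seen → y ∈ nxt') →
                pvPhi nums p rest nxt' seen' ≤ f →
                layerBFS nums (nums.length : Int) p f rest nxt' seen' step =
                  @dite Int (∃ m, pvHit nums p (x :: rest) nxt m = true) (Classical.dec _)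
                    (fun h => step + (Nat.find h : Int)) (fun _ => -1) := by
              intro nxt' seen' hseen hnxtseen hsup hsub hnew hphi
              have hC1n : ∀ y ∈ rest, y ∈ seen' :=
                fun y hy => (hseen y).mpr (Or.inl (hC1 y (List.mem_cons_of_mem _ hy)))
              have hxchild : (x + num) ∈ seen' ∧ (x - num) ∈ seen' :=
                ⟨(hseen _).mpr (Or.inr (Or.inl rfl)), (hseen _).mpr (Or.inr (Or.inr rfl))⟩
              have hC3n : ∀ y ∈ seen', pvExp nums p y = true →
                  y ∈ rest ∨ y ∈ nxt' ∨
                    ((y + pvVal nums y) ∈ seen' ∧ (y - pvVal nums y) ∈ seen') := by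
                intro y hy hye
                by_cases hys : y ∈ seen
                · rcases hC3 y hys hye with hf | hn | hch
                  · rcases List.mem_cons.mp hf with rfl | hf
                    · refine Or.inr (Or.inr ?_)
                      rw [hval]
                      exact hxchild
                    · exact Or.inl hf
                  · exact Or.inr (Or.inl (hsup y hn))
                  · exact Or.inr (Or.inr ⟨(hseen _).mpr (Or.inl hch.1),
                      (hseen _).mpr (Or.inl hch.2)⟩)
                · rcases (hseen y).mp hy with h | h | h
                  · exact absurd h hys
                  · exact Or.inr (Or.inl (hnew y (Or.inl h) hys))
                  · exact Or.inr (Or.inl (hnew y (Or.inr h) hys))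
              have hC4n : ∀ y ∈ seen', pvTgt nums p y = true → y ∈ rest ∨ y ∈ nxt' := by
                intro y hy hyt
                by_cases hys : y ∈ seen
                · rcases hC4 y hys hyt with hf | hn
                  · rcases List.mem_cons.mp hf with rfl | hf
                    · rw [htgtx] at hyt; cases hyt
                    · exact Or.inl hf
                  · exact Or.inr (hsup y hn)
                · rcases (hseen y).mp hy with h | h | h
                  · exact absurd h hys
                  · exact Or.inr (hnew y (Or.inl h) hys)
                  · exact Or.inr (hnew y (Or.inr h) hys)
              have hmeas : 2 * f + (if rest = ([] : List Int) then 1 else 0) ≤ 2 * f + 1 := by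
                split <;> omega
              rw [ih (2 * f + 1) (by omega) f rest nxt' seen' step hmeas
                hC1n hnxtseen hC3n hC4n hphi]
              refine (pv_dite_eq_of (fun m => pvHit nums p (x :: rest) nxt m)
                (fun m => pvHit nums p rest nxt' m) ?_ ?_ step).symm
              · intro m hq
                rcases m with _ | s <;>
                  simp only [pvHit, Bool.or_eq_true, List.any_eq_true,
                    Bool.false_eq_true, or_false] at hq ⊢
                · obtain ⟨z, hz, hp⟩ := hq
                  exact ⟨z, List.mem_cons_of_mem _ hz, hp⟩
                · rcases hq with ⟨z, hz, hp⟩ | ⟨z, hz, hp⟩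
                  · exact Or.inl ⟨z, List.mem_cons_of_mem _ hz, hp⟩
                  · rcases hsub z hz with h | h | h
                    · exact Or.inr ⟨z, h, hp⟩
                    · subst h
                      exact Or.inl ⟨x, List.mem_cons_self, by
                        rw [hpathx s, hp]; simp⟩
                    · subst h
                      exact Or.inl ⟨x, List.mem_cons_self, by
                        rw [hpathx s, hp]; simp⟩
              · intro m hp
                rcases m with _ | s <;>
                  simp only [pvHit, Bool.or_eq_true, List.any_eq_true,
                    Bool.false_eq_true, or_false] at hp
                · obtain ⟨z, hz, hpz⟩ := hp
                  rcases List.mem_cons.mp hz with rfl | hz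
                  · rw [show pvPath nums p 0 z = pvTgt nums p z from rfl, htgtx] at hpz
                    cases hpz
                  · refine ⟨0, le_refl 0, ?_⟩
                    simp only [pvHit, Bool.or_eq_true, List.any_eq_true]
                    exact Or.inl ⟨z, hz, hpz⟩
                · rcases hp with ⟨z, hz, hpz⟩ | ⟨z, hz, hpz⟩
                  · rcases List.mem_cons.mp hz with rfl | hz
                    · rw [hpathx s] at hpz
                      rw [Bool.or_eq_true] at hpz
                      rcases hpz with hc | hc
                      · obtain ⟨m', hm', hh⟩ :=
                          pv_descent nums p rest nxt' seen' hC3n hC4n s _ hxchild.1 hc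
                        exact ⟨m', by omega, hh⟩
                      · obtain ⟨m', hm', hh⟩ :=
                          pv_descent nums p rest nxt' seen' hC3n hC4n s _ hxchild.2 hc
                        exact ⟨m', by omega, hh⟩
                    · exact ⟨s + 1, le_refl _, by
                        simp only [pvHit, Bool.or_eq_true, List.any_eq_true]
                        exact Or.inl ⟨z, hz, hpz⟩⟩
                  · exact ⟨s + 1, le_refl _, by
                      simp only [pvHit, Bool.or_eq_true, List.any_eq_true]
                      exact Or.inr ⟨z, hsup z hz, hpz⟩⟩
            have hphi0 : pvC nums p x + (rest.map (pvC nums p)).sum +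
                (nxt.map (pvC nums p)).sum + 3 * pvEun nums p seen ≤ f + 1 := by
              simpa only [pvPhi, List.map_cons, List.sum_cons, Nat.add_assoc] using hfuel
            have hCx : pvC nums p x = 3 := by simp [pvC, hexp]
            by_cases h1 : (x + num) ∈ seen
            · rw [if_pos h1]
              by_cases h2 : (x - num) ∈ seen
              · rw [if_pos h2]
                apply key nxt seen
                · intro y
                  constructor
                  · exact Or.inl
                  · rintro (h | rfl | rfl) <;> assumption
                · exact hC1'
                · exact fun y h => h
                · exact fun y h => Or.inl h
                · rintro y (rfl | rfl) hns <;> exact absurd (by assumption) hns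
                · simp only [pvPhi]
                  omega
              · rw [if_neg h2]
                apply key (nxt ++ [x - num]) (PySem.Set.add seen (x - num))
                · intro y
                  rw [PySem.Set.mem_add]
                  constructor
                  · rintro (h | rfl)
                    · exact Or.inl h
                    · exact Or.inr (Or.inr rfl)
                  · rintro (h | rfl | rfl)
                    · exact Or.inl h
                    · exact Or.inl h1
                    · exact Or.inr rfl
                · intro y hy
                  rw [PySem.Set.mem_add]
                  rcases List.mem_append.mp hy with h | h
                  · exact Or.inl (hC1' y h)
                  · simp only [List.mem_singleton] at h
                    exact Or.inr h
                · exact fun y h => List.mem_append_left _ h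
                · intro y hy
                  rcases List.mem_append.mp hy with h | h
                  · exact Or.inl h
                  · simp only [List.mem_singleton] at h
                    exact Or.inr (Or.inr h)
                · rintro y (rfl | rfl) hns
                  · exact absurd h1 hns
                  · exact List.mem_append_right _ (by simp)
                · simp only [pvPhi, List.map_append, List.sum_append, List.map_cons,
                    List.sum_cons, List.map_nil, List.sum_nil]
                  rcases he : pvExp nums p (x - num)
                  · rw [pvEun_add_nonexp nums p seen _ he]
                    have : pvC nums p (x - num) = 1 := by simp [pvC, he]
                    omega
                  · have := pvEun_add_exp nums p seen _ he h2
                    have hc : pvC nums p (x - num) = 3 := by simp [pvC, he]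
                    omega
            · rw [if_neg h1]
              by_cases h2 : (x - num) ∈ PySem.Set.add seen (x + num)
              · rw [if_pos h2]
                rcases PySem.Set.mem_add _ _ _ |>.mp h2 with h2s | h2e
                · apply key (nxt ++ [x + num]) (PySem.Set.add seen (x + num))
                  · intro y
                    rw [PySem.Set.mem_add]
                    constructor
                    · rintro (h | rfl)
                      · exact Or.inl h
                      · exact Or.inr (Or.inl rfl)
                    · rintro (h | rfl | rfl)
                      · exact Or.inl h
                      · exact Or.inr rfl
                      · exact Or.inl h2s
                  · intro y hy
                    rw [PySem.Set.mem_add]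
                    rcases List.mem_append.mp hy with h | h
                    · exact Or.inl (hC1' y h)
                    · simp only [List.mem_singleton] at h
                      exact Or.inr h
                  · exact fun y h => List.mem_append_left _ h
                  · intro y hy
                    rcases List.mem_append.mp hy with h | h
                    · exact Or.inl h
                    · simp only [List.mem_singleton] at h
                      exact Or.inr (Or.inl h)
                  · rintro y (rfl | rfl) hns
                    · exact List.mem_append_right _ (by simp)
                    · exact absurd h2s hns
                  · simp only [pvPhi, List.map_append, List.sum_append, List.map_cons,
                      List.sum_cons, List.map_nil, List.sum_nil]
                    rcases he : pvExp nums p (x + num)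
                    · rw [pvEun_add_nonexp nums p seen _ he]
                      have : pvC nums p (x + num) = 1 := by simp [pvC, he]
                      omega
                    · have := pvEun_add_exp nums p seen _ he h1
                      have hc : pvC nums p (x + num) = 3 := by simp [pvC, he]
                      omega
                · -- x - num = x + num: both children are the same single fresh value
                  apply key (nxt ++ [x + num]) (PySem.Set.add seen (x + num))
                  · intro y
                    rw [PySem.Set.mem_add]
                    constructor
                    · rintro (h | rfl)
                      · exact Or.inl h
                      · exact Or.inr (Or.inl rfl)
                    · rintro (h | rfl | rfl)
                      · exact Or.inl h
                      · exact Or.inr rfl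
                      · exact Or.inr (h2e.symm ▸ rfl)
                  · intro y hy
                    rw [PySem.Set.mem_add]
                    rcases List.mem_append.mp hy with h | h
                    · exact Or.inl (hC1' y h)
                    · simp only [List.mem_singleton] at h
                      exact Or.inr h
                  · exact fun y h => List.mem_append_left _ h
                  · intro y hy
                    rcases List.mem_append.mp hy with h | h
                    · exact Or.inl h
                    · simp only [List.mem_singleton] at h
                      exact Or.inr (Or.inl h)
                  · rintro y (rfl | rfl) hns
                    · exact List.mem_append_right _ (by simp)
                    · exact List.mem_append_right _ (by simp [h2e])
                  · simp only [pvPhi, List.map_append, List.sum_append, List.map_cons,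
                      List.sum_cons, List.map_nil, List.sum_nil]
                    rcases he : pvExp nums p (x + num)
                    · rw [pvEun_add_nonexp nums p seen _ he]
                      have : pvC nums p (x + num) = 1 := by simp [pvC, he]
                      omega
                    · have := pvEun_add_exp nums p seen _ he h1
                      have hc : pvC nums p (x + num) = 3 := by simp [pvC, he]
                      omega
              · rw [if_neg h2]
                have h2s : (x - num) ∉ seen := by
                  intro h
                  exact h2 ((PySem.Set.mem_add _ _ _).mpr (Or.inl h))
                apply key (nxt ++ [x + num] ++ [x - num])
                  (PySem.Set.add (PySem.Set.add seen (x + num)) (x - num))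
                · intro y
                  rw [PySem.Set.mem_add, PySem.Set.mem_add]
                  constructor
                  · rintro ((h | rfl) | rfl)
                    · exact Or.inl h
                    · exact Or.inr (Or.inl rfl)
                    · exact Or.inr (Or.inr rfl)
                  · rintro (h | rfl | rfl)
                    · exact Or.inl (Or.inl h)
                    · exact Or.inl (Or.inr rfl)
                    · exact Or.inr rfl
                · intro y hy
                  rw [PySem.Set.mem_add, PySem.Set.mem_add]
                  rcases List.mem_append.mp hy with h | h
                  · rcases List.mem_append.mp h with h' | h'
                    · exact Or.inl (Or.inl (hC1' y h'))
                    · simp only [List.mem_singleton] at h'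
                      exact Or.inl (Or.inr h')
                  · simp only [List.mem_singleton] at h
                    exact Or.inr h
                · exact fun y h => List.mem_append_left _ (List.mem_append_left _ h)
                · intro y hy
                  rcases List.mem_append.mp hy with h | h
                  · rcases List.mem_append.mp h with h' | h'
                    · exact Or.inl h'
                    · simp only [List.mem_singleton] at h'
                      exact Or.inr (Or.inl h')
                  · simp only [List.mem_singleton] at h
                    exact Or.inr (Or.inr h)
                · rintro y (rfl | rfl) hns
                  · exact List.mem_append_left _ (List.mem_append_right _ (by simp))
                  · exact List.mem_append_right _ (by simp)
                · simp only [pvPhi, List.map_append, List.sum_append, List.map_cons,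
                    List.sum_cons, List.map_nil, List.sum_nil]
                  have hfresh2 : (x - num) ∉ PySem.Set.add seen (x + num) := h2
                  rcases he1 : pvExp nums p (x + num) <;>
                    rcases he2 : pvExp nums p (x - num)
                  · rw [pvEun_add_nonexp nums p _ _ he2, pvEun_add_nonexp nums p seen _ he1]
                    have c1 : pvC nums p (x + num) = 1 := by simp [pvC, he1]
                    have c2 : pvC nums p (x - num) = 1 := by simp [pvC, he2]
                    omega
                  · have e2 := pvEun_add_exp nums p _ _ he2 hfresh2
                    rw [pvEun_add_nonexp nums p seen _ he1] at e2
                    have c1 : pvC nums p (x + num) = 1 := by simp [pvC, he1]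
                    have c2 : pvC nums p (x - num) = 3 := by simp [pvC, he2]
                    omega
                  · rw [pvEun_add_nonexp nums p _ _ he2]
                    have e1 := pvEun_add_exp nums p seen _ he1 h1
                    have c1 : pvC nums p (x + num) = 3 := by simp [pvC, he1]
                    have c2 : pvC nums p (x - num) = 1 := by simp [pvC, he2]
                    omega
                  · have e2 := pvEun_add_exp nums p _ _ he2 hfresh2
                    have e1 := pvEun_add_exp nums p seen _ he1 h1
                    have c1 : pvC nums p (x + num) = 3 := by simp [pvC, he1]
                    have c2 : pvC nums p (x - num) = 3 := by simp [pvC, he2]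
                    omega
        · rw [if_pos hin]
          have hInB : pvInB nums x = false := by
            rw [Bool.eq_false_iff]
            intro h
            exact hin (by simpa only [pvInB, Bool.and_eq_true_iff, decide_eq_true_eq] using h)
          have hpx : ∀ m, pvPath nums p m x = false := by
            intro m
            rcases hv : pvPath nums p m x
            · rfl
            · have := pvPath_inB nums p m x hv
              rw [hInB] at this
              cases this
          have hxexp : pvExp nums p x = false := by
            simp [pvExp, hInB]
          have hxtgt : pvTgt nums p x = false := by
            simp [pvTgt, hInB]
          have hmeas : 2 * f + (if rest = ([] : List Int) then 1 else 0) ≤ 2 * f + 1 := by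
            split <;> omega
          rw [ih (2 * f + 1) (by omega) f rest nxt seen step hmeas
            (fun y hy => hC1 y (List.mem_cons_of_mem _ hy)) hC1'
            (fun y hy hye => by
              rcases hC3 y hy hye with hf | h | h
              · rcases List.mem_cons.mp hf with rfl | hf
                · rw [hxexp] at hye; cases hye
                · exact Or.inl hf
              · exact Or.inr (Or.inl h)
              · exact Or.inr (Or.inr h))
            (fun y hy hyt => by
              rcases hC4 y hy hyt with hf | h
              · rcases List.mem_cons.mp hf with rfl | hf
                · rw [hxtgt] at hyt; cases hyt
                · exact Or.inl hf
              · exact Or.inr h)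
            (by
              have hcx : pvC nums p x = 1 := by simp [pvC, hxexp]
              simp only [pvPhi, List.map_cons, List.sum_cons] at hfuel ⊢
              omega)]
          refine (pv_dite_eq_of (fun m => pvHit nums p (x :: rest) nxt m)
            (fun m => pvHit nums p rest nxt m) ?_ ?_ step).symm
          · intro m hq
            rcases m with _ | s <;>
              simp only [pvHit, Bool.or_eq_true, List.any_eq_true,
                Bool.false_eq_true, or_false] at hq ⊢
            · obtain ⟨z, hz, hp⟩ := hq
              exact ⟨z, List.mem_cons_of_mem _ hz, hp⟩
            · rcases hq with ⟨z, hz, hp⟩ | hq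
              · exact Or.inl ⟨z, List.mem_cons_of_mem _ hz, hp⟩
              · exact Or.inr hq
          · intro m hp
            refine ⟨m, le_refl m, ?_⟩
            rcases m with _ | s <;>
              simp only [pvHit, Bool.or_eq_true, List.any_eq_true,
                Bool.false_eq_true, or_false] at hp ⊢
            · obtain ⟨z, hz, hpz⟩ := hp
              rcases List.mem_cons.mp hz with rfl | hz
              · rw [hpx 0] at hpz; cases hpz
              · exact ⟨z, hz, hpz⟩
            · rcases hp with ⟨z, hz, hpz⟩ | hp
              · rcases List.mem_cons.mp hz with rfl | hz
                · rw [hpx (s + 1)] at hpz; cases hpz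
                · exact Or.inl ⟨z, hz, hpz⟩
              · exact Or.inr hp

-- A's per-start answer, in closed form
lemma pv_solveBFS_spec (nums : List Int) (i v : Int)
    (hv : PySem.List.pyGet? nums i = some v) :
    solveBFS nums (nums.length : Int) (PySem.Int.mod v 2) (3 * nums.length + 8)
        [(i + v, 1), (i - v, 1)] (PySem.Set.ofList [i + v, i - v]) =
      @dite Int (∃ m, (pvPath nums (PySem.Int.mod v 2) m (i + v)
                    || pvPath nums (PySem.Int.mod v 2) m (i - v)) = true) (Classical.dec _)
        (fun h => 1 + (Nat.find h : Int)) (fun _ => -1) := by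
  have hb := pv_bfs_bisim nums (nums.length : Int) (PySem.Int.mod v 2) (3 * nums.length + 8)
    [i + v, i - v] [] (PySem.Set.ofList [i + v, i - v]) 1
  simp only [List.map_cons, List.map_nil, List.append_nil] at hb
  rw [hb]
  have hmem : ∀ y : Int, y ∈ PySem.Set.ofList [i + v, i - v] → y ∈ ([i + v, i - v] : List Int) :=
    fun y hy => (PySem.Set.mem_ofList _ _).mp hy
  have hfuel : pvPhi nums (PySem.Int.mod v 2) [i + v, i - v] []
      (PySem.Set.ofList [i + v, i - v]) ≤ 3 * nums.length + 8 := by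
    have ca : pvC nums (PySem.Int.mod v 2) (i + v) ≤ 3 := by unfold pvC; split <;> omega
    have cb : pvC nums (PySem.Int.mod v 2) (i - v) ≤ 3 := by unfold pvC; split <;> omega
    have hE := pvEun_le nums (PySem.Int.mod v 2) (PySem.Set.ofList [i + v, i - v])
    simp only [pvPhi, List.map_cons, List.map_nil, List.sum_cons, List.sum_nil]
    omega
  rw [pv_layer_main nums (PySem.Int.mod v 2) (2 * (3 * nums.length + 8))
    (3 * nums.length + 8) [i + v, i - v] [] (PySem.Set.ofList [i + v, i - v]) 1
    (by simp)
    (fun y hy => (PySem.Set.mem_ofList _ _).mpr hy)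
    (by simp)
    (fun y hy _ => Or.inl (hmem y hy))
    (fun y hy _ => Or.inl (hmem y hy))
    hfuel]
  have hpt : ∀ m, pvHit nums (PySem.Int.mod v 2) [i + v, i - v] [] m =
      (pvPath nums (PySem.Int.mod v 2) m (i + v) || pvPath nums (PySem.Int.mod v 2) m (i - v)) := by
    intro m
    rcases m with _ | s <;> simp [pvHit]
  exact pv_dite_eq_of _ _ (fun m h => by rw [hpt m]; exact h)
    (fun m h => ⟨m, le_refl m, by rw [← hpt m]; exact h⟩) 1

-- ---------- B side: correctness of the round relaxation ----------

lemma pvR_mono (nums : List Int) (p : Int) (d e : Nat) (x : Int) (hde : d ≤ e)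
    (h : pvR nums p d x = true) : pvR nums p e x = true := by
  simp only [pvR, List.any_eq_true] at h ⊢
  obtain ⟨s, hs, hp⟩ := h
  exact ⟨s, by simp only [List.mem_range] at hs ⊢; omega, hp⟩

lemma pvR_succ (nums : List Int) (p : Int) (d : Nat) (x : Int) :
    pvR nums p (d+1) x =
      (pvR nums p d x || (pvExp nums p x &&
        (pvR nums p d (x + pvVal nums x) || pvR nums p d (x - pvVal nums x)))) := by
  simp only [pvR, List.any_eq_true, List.mem_range]
  rw [Bool.eq_iff_iff]
  simp only [Bool.or_eq_true, Bool.and_eq_true_iff, List.any_eq_true, List.mem_range]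
  constructor
  · rintro ⟨s, hs, hp⟩
    cases s with
    | zero => exact Or.inl ⟨0, by omega, hp⟩
    | succ t =>
      by_cases hlt : t + 1 < d + 1
      · exact Or.inl ⟨t + 1, hlt, hp⟩
      · have ht : t < d + 1 := by omega
        simp only [pvPath, Bool.and_eq_true_iff, Bool.or_eq_true] at hp
        refine Or.inr ⟨hp.1, ?_⟩
        rcases hp.2 with h | h
        · exact Or.inl ⟨t, ht, h⟩
        · exact Or.inr ⟨t, ht, h⟩
  · rintro (⟨s, hs, hp⟩ | ⟨hx, h⟩)
    · exact ⟨s, by omega, hp⟩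
    · rcases h with ⟨s, hs, hp⟩ | ⟨s, hs, hp⟩
      · exact ⟨s + 1, by omega, by simp [pvPath, hx, hp]⟩
      · exact ⟨s + 1, by omega, by simp [pvPath, hx, hp]⟩

lemma pv_stab (nums : List Int) (p : Int) (d : Nat)
    (hstab : ∀ y : Int, pvExp nums p y = true → pvR nums p d y = false →
      pvR nums p d (y + pvVal nums y) = false ∧ pvR nums p d (y - pvVal nums y) = false) :
    ∀ (e : Nat) (x : Int), pvR nums p (d + e) x = pvR nums p d x := by
  intro e
  induction e with
  | zero => intro x; rfl
  | succ e ih =>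
    intro x
    have : d + (e + 1) = (d + e) + 1 := by omega
    rw [this, pvR_succ]
    rw [ih x, ih (x + pvVal nums x), ih (x - pvVal nums x)]
    cases hx : pvR nums p d x
    · cases he : pvExp nums p x
      · simp
      · have := hstab x he hx
        simp [this.1, this.2]
    · simp

lemma pv_foldl_set_add_mem (l : List Int) (s : PySem.Set Int) (x : Int) :
    x ∈ l.foldl (fun s i => PySem.Set.add s i) s ↔ (x ∈ l ∨ x ∈ s) := by
  induction l generalizing s with
  | nil => simp
  | cons a t ih =>
    simp only [List.foldl_cons, ih, PySem.Set.mem_add, List.mem_cons]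
    tauto

lemma pv_get?_foldl_insert (l : List Int) (res : PySem.Dict Int Int) (w x : Int) :
    (l.foldl (fun r i => PySem.Dict.insert r i w) res).get? x =
      if x ∈ l then some w else res.get? x := by
  induction l generalizing res with
  | nil => simp
  | cons a t ih =>
    simp only [List.foldl_cons, ih, List.mem_cons]
    by_cases ht : x ∈ t
    · simp [ht]
    · rcases eq_or_ne x a with rfl | hne
      · simp [ht, PySem.Dict.get?_insert]
      · simp [ht, hne, PySem.Dict.get?_insert]

lemma pvR_of_path (nums : List Int) (p : Int) (s : Nat) (x : Int)
    (h : pvPath nums p s x = true) : pvR nums p s x = true := by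
  simp only [pvR, List.any_eq_true, List.mem_range]
  exact ⟨s, by omega, h⟩

lemma pvR_inB (nums : List Int) (p : Int) (d : Nat) (x : Int)
    (h : pvR nums p d x = true) : pvInB nums x = true := by
  simp only [pvR, List.any_eq_true, List.mem_range] at h
  obtain ⟨s, _, hp⟩ := h
  exact pvPath_inB nums p s x hp

lemma pv_roundLoop_spec (nums : List Int) (q p : Int) (hpq : p + q = 1)
    (hq : q = 0 ∨ q = 1) :
    ∀ (dN : Nat) (pending settled : List Int) (res : PySem.Dict Int Int),
      (∀ x : Int, x ∈ settled ↔ pvR nums p dN x = true) →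
      pending = (PySem.List.pyRange 0 (nums.length : Int) 1).filter
        (fun i => (PySem.Int.mod (pvVal nums i) 2 != q) && !(pvR nums p dN i)) →
      ∀ x : Int,
        (solveRound nums (nums.length : Int) pending settled res (dN : Int)).get? x =
          @dite (Option Int) (pvExp nums p x = true ∧ pvR nums p dN x = false ∧
                  (∃ s, pvPath nums p s x = true)) (Classical.dec _)
            (fun h => some ((Nat.find h.2.2 : Int)))
            (fun _ => res.get? x) := by
  suffices H : ∀ (L dN : Nat) (pending settled : List Int) (res : PySem.Dict Int Int),
      pending.length ≤ L →
      (∀ x : Int, x ∈ settled ↔ pvR nums p dN x = true) →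
      pending = (PySem.List.pyRange 0 (nums.length : Int) 1).filter
        (fun i => (PySem.Int.mod (pvVal nums i) 2 != q) && !(pvR nums p dN i)) →
      ∀ x : Int,
        (solveRound nums (nums.length : Int) pending settled res (dN : Int)).get? x =
          @dite (Option Int) (pvExp nums p x = true ∧ pvR nums p dN x = false ∧
                  (∃ s, pvPath nums p s x = true)) (Classical.dec _)
            (fun h => some ((Nat.find h.2.2 : Int)))
            (fun _ => res.get? x) by
    intro dN pending settled res hset hpend x
    exact H pending.length dN pending settled res (le_refl _) hset hpend x
  intro L
  induction L using Nat.strong_induction_on with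
  | _ L ihL =>
    intro dN pending settled res hL hset hpend x
    have hq01 : q = 0 ∨ q = 1 := hq
    -- pending membership characterisation
    have hpendmem : ∀ y : Int, y ∈ pending ↔
        (pvExp nums p y = true ∧ pvR nums p dN y = false) := by
      intro y
      rw [hpend, List.mem_filter, PySem.List.mem_pyRange_one]
      constructor
      · rintro ⟨⟨h0, h1⟩, hb⟩
        rw [Bool.and_eq_true_iff, bne_iff_ne, Bool.not_eq_eq_eq_not, Bool.not_true] at hb
        have hinB : pvInB nums y = true := by
          simp only [pvInB, Bool.and_eq_true_iff, decide_eq_true_eq]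
          exact ⟨h0, h1⟩
        refine ⟨?_, hb.2⟩
        simp only [pvExp, hinB, Bool.true_and, beq_iff_eq]
        rcases pvMod2_cases (pvVal nums y) with hm | hm <;> rcases hq01 with rfl | rfl <;>
          simp_all <;> omega
      · rintro ⟨he, hr⟩
        have hinB : pvInB nums y = true := (Bool.and_eq_true_iff.mp he).1
        simp only [pvInB, Bool.and_eq_true_iff, decide_eq_true_eq] at hinB
        refine ⟨hinB, ?_⟩
        rw [Bool.and_eq_true_iff, bne_iff_ne, Bool.not_eq_eq_eq_not, Bool.not_true]
        have hmv : PySem.Int.mod (pvVal nums y) 2 = p :=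
          beq_iff_eq.mp (Bool.and_eq_true_iff.mp he).2
        exact ⟨by omega, hr⟩
    rw [solveRound]
    by_cases hp : pending = []
    · rw [dif_pos hp]
      rw [dif_neg]
      rintro ⟨he, hr, hpath⟩
      have : x ∈ pending := (hpendmem x).mpr ⟨he, by rw [hr]⟩
      rw [hp] at this
      cases this
    · rw [dif_neg hp]
      by_cases hn : pending.filter (jumpSettled nums (nums.length : Int) settled) = []
      · rw [dif_pos hn]
        -- stabilisation: nothing new can ever be settled
        have hstab : ∀ y : Int, pvExp nums p y = true → pvR nums p dN y = false →
            pvR nums p dN (y + pvVal nums y) = false ∧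
            pvR nums p dN (y - pvVal nums y) = false := by
          intro y hye hyr
          have hymem : y ∈ pending := (hpendmem y).mpr ⟨hye, hyr⟩
          by_contra hcon
          have hjump : jumpSettled nums (nums.length : Int) settled y = true := by
            simp only [jumpSettled, Bool.or_eq_true, Bool.and_eq_true_iff,
              decide_eq_true_eq]
            rcases Decidable.em (pvR nums p dN (y + pvVal nums y) = false) with h1 | h1
            · have h2 : pvR nums p dN (y - pvVal nums y) = true := by
                rcases Decidable.em (pvR nums p dN (y - pvVal nums y) = false) with h | h
                · exact absurd ⟨h1, h⟩ hcon
                · simpa using h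
              have hinB := pvR_inB nums p dN _ h2
              simp only [pvInB, Bool.and_eq_true_iff, decide_eq_true_eq] at hinB
              exact Or.inr ⟨⟨hinB.1, hinB.2⟩, (hset _).mpr h2⟩
            · have h1' : pvR nums p dN (y + pvVal nums y) = true := by simpa using h1
              have hinB := pvR_inB nums p dN _ h1'
              simp only [pvInB, Bool.and_eq_true_iff, decide_eq_true_eq] at hinB
              exact Or.inl ⟨⟨hinB.1, hinB.2⟩, (hset _).mpr h1'⟩
          have : y ∈ pending.filter (jumpSettled nums (nums.length : Int) settled) :=
            List.mem_filter.mpr ⟨hymem, hjump⟩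
          rw [hn] at this
          cases this
        rw [dif_neg]
        rintro ⟨he, hr, s, hpath⟩
        have hRs : pvR nums p s x = true := pvR_of_path nums p s x hpath
        rcases le_or_gt s dN with hle | hgt
        · rw [pvR_mono nums p s dN x hle hRs] at hr
          cases hr
        · have : pvR nums p (dN + (s - dN)) x = pvR nums p dN x :=
            pv_stab nums p dN hstab (s - dN) x
          rw [show dN + (s - dN) = s by omega, hRs, hr] at this
          cases this
      · rw [dif_neg hn]
        set newly := pending.filter (jumpSettled nums (nums.length : Int) settled) with hnewly
        set settled' := newly.foldl (fun s i => PySem.Set.add s i) settled with hsettled'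
        -- newly membership: the indices settled exactly at round dN+1
        have hnewmem : ∀ y : Int, y ∈ newly ↔
            (pvExp nums p y = true ∧ pvR nums p dN y = false ∧
              pvR nums p (dN + 1) y = true) := by
          intro y
          rw [hnewly, List.mem_filter, hpendmem]
          constructor
          · rintro ⟨⟨hye, hyr⟩, hj⟩
            refine ⟨hye, hyr, ?_⟩
            rw [pvR_succ]
            simp only [jumpSettled, Bool.or_eq_true, Bool.and_eq_true_iff,
              decide_eq_true_eq] at hj
            rcases hj with ⟨_, hmem⟩ | ⟨_, hmem⟩ <;>
              simp [pvVal, hye, (hset _).mp hmem]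
          · rintro ⟨hye, hyr, hy1⟩
            refine ⟨⟨hye, hyr⟩, ?_⟩
            rw [pvR_succ, hyr, Bool.false_or, Bool.and_eq_true_iff] at hy1
            simp only [jumpSettled, Bool.or_eq_true, Bool.and_eq_true_iff,
              decide_eq_true_eq]
            have hy2 := hy1.2
            rw [Bool.or_eq_true] at hy2
            rcases hy2 with hc | hc
            · have hinB := pvR_inB nums p dN _ hc
              simp only [pvInB, Bool.and_eq_true_iff, decide_eq_true_eq] at hinB
              exact Or.inl ⟨⟨hinB.1, hinB.2⟩, (hset _).mpr hc⟩
            · have hinB := pvR_inB nums p dN _ hc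
              simp only [pvInB, Bool.and_eq_true_iff, decide_eq_true_eq] at hinB
              exact Or.inr ⟨⟨hinB.1, hinB.2⟩, (hset _).mpr hc⟩
        have hset' : ∀ y : Int, y ∈ settled' ↔ pvR nums p (dN + 1) y = true := by
          intro y
          rw [hsettled', pv_foldl_set_add_mem]
          constructor
          · rintro (h | h)
            · exact ((hnewmem y).mp h).2.2
            · exact pvR_mono nums p dN (dN + 1) y (by omega) ((hset y).mp h)
          · intro h
            rcases hy : pvR nums p dN y
            · rw [pvR_succ, hy, Bool.false_or, Bool.and_eq_true_iff] at h
              have hinB : pvInB nums y = true := (Bool.and_eq_true_iff.mp h.1).1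
              left
              rw [hnewmem]
              exact ⟨h.1, hy, by rw [pvR_succ, hy, Bool.false_or]; exact
                Bool.and_eq_true_iff.mpr h⟩
            · exact Or.inr ((hset y).mpr hy)
        have hpend' : pending.filter (fun i => !decide (i ∈ settled')) =
            (PySem.List.pyRange 0 (nums.length : Int) 1).filter
              (fun i => (PySem.Int.mod (pvVal nums i) 2 != q) && !(pvR nums p (dN + 1) i)) := by
          rw [hpend, List.filter_filter]
          apply List.filter_congr
          intro y hy
          rcases hmod : (PySem.Int.mod (pvVal nums y) 2 != q) with _ | _
          · simp
          · simp only [Bool.true_and]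
            rcases hR1 : pvR nums p (dN + 1) y
            · have hR0 : pvR nums p dN y = false := by
                rcases h0 : pvR nums p dN y
                · rfl
                · rw [pvR_mono nums p dN (dN + 1) y (by omega) h0] at hR1
                  cases hR1
              simp only [hR0, Bool.not_false, Bool.true_and]
              have : y ∉ settled' := fun hmem => by rw [(hset' y).mp hmem] at hR1; cases hR1
              simp [this]
            · rcases hR0 : pvR nums p dN y
              · simp only [hR0, Bool.not_false, Bool.true_and]
                have : y ∈ settled' := (hset' y).mpr hR1
                simp [this]
              · simp
        have hlen' : (pending.filter (fun i => !decide (i ∈ settled'))).length < pending.length := by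
          apply List.length_filter_lt_length_iff_exists.mpr
          rcases List.exists_mem_of_ne_nil _ hn with ⟨z, hz⟩
          refine ⟨z, List.mem_of_mem_filter hz, ?_⟩
          have : z ∈ settled' := by
            rw [hsettled']
            exact pv_mem_foldl_set_add _ _ _ (Or.inl hz)
          simp [this]
        have hrec := ihL (pending.filter (fun i => !decide (i ∈ settled'))).length
          (by omega) (dN + 1) _ settled'
          (newly.foldl (fun r i => PySem.Dict.insert r i ((dN : Int) + 1)) res)
          (le_refl _) hset' hpend' x
        push_cast at hrec
        rw [hrec]
        -- compare the two dites
        have hres' : (newly.foldl (fun r i => PySem.Dict.insert r i ((dN : Int) + 1)) res).get? x =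
            if x ∈ newly then some ((dN : Int) + 1) else res.get? x :=
          pv_get?_foldl_insert newly res _ x
        by_cases hcond : pvExp nums p x = true ∧ pvR nums p dN x = false ∧
            (∃ s, pvPath nums p s x = true)
        · rw [dif_pos hcond]
          by_cases hR1 : pvR nums p (dN + 1) x = true
          · have hx : x ∈ newly := (hnewmem x).mpr ⟨hcond.1, hcond.2.1, hR1⟩
            rw [dif_neg (by rintro ⟨-, h, -⟩; rw [h] at hR1; cases hR1)]
            rw [hres', if_pos hx]
            -- the first settling round is dN+1 = the shortest path length
            have hfind : Nat.find hcond.2.2 = dN + 1 := by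
              have hle : Nat.find hcond.2.2 ≤ dN + 1 := by
                have := hR1
                simp only [pvR, List.any_eq_true, List.mem_range] at this
                obtain ⟨s, hs, hp'⟩ := this
                exact le_trans (Nat.find_le hp') (by omega)
              have hgt : ¬ Nat.find hcond.2.2 ≤ dN := by
                intro h
                have hsp := Nat.find_spec hcond.2.2
                have : pvR nums p dN x = true := by
                  simp only [pvR, List.any_eq_true, List.mem_range]
                  exact ⟨Nat.find hcond.2.2, by omega, hsp⟩
                rw [hcond.2.1] at this
                cases this
              omega
            rw [hfind]
            push_cast
            ring_nf
          · have hR1f : pvR nums p (dN + 1) x = false := by simpa using hR1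
            rw [dif_pos ⟨hcond.1, hR1f, hcond.2.2⟩]
        · rw [dif_neg hcond]
          have hxnot : x ∉ newly := by
            intro hx
            obtain ⟨he, hr, h1⟩ := (hnewmem x).mp hx
            have hpath : ∃ s, pvPath nums p s x = true := by
              simp only [pvR, List.any_eq_true, List.mem_range] at h1
              obtain ⟨s, _, hp'⟩ := h1
              exact ⟨s, hp'⟩
            exact hcond ⟨he, hr, hpath⟩
          by_cases hcond' : pvExp nums p x = true ∧ pvR nums p (dN + 1) x = false ∧
              (∃ s, pvPath nums p s x = true)
          · exfalso
            apply hcond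
            refine ⟨hcond'.1, ?_, hcond'.2.2⟩
            rcases h0 : pvR nums p dN x
            · rfl
            · rw [pvR_mono nums p dN (dN + 1) x (by omega) h0] at hcond'
              exact absurd hcond'.2.1 (by simp)
          · rw [dif_neg hcond', hres', if_neg hxnot]

-- relating the per-start answer (least path length from the two jump targets)
-- to the settling round of the start (least path length from the start itself)
lemma pv_answer_shift (nums : List Int) (p a b x : Int)
    (h0 : pvPath nums p 0 x = false)
    (hs : ∀ s : Nat, pvPath nums p (s + 1) x =
      (pvPath nums p s a || pvPath nums p s b))
    (hEx : ∃ m, (pvPath nums p m a || pvPath nums p m b) = true)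
    (hEx' : ∃ s, pvPath nums p s x = true) :
    (Nat.find hEx' : Int) = 1 + (Nat.find hEx : Int) := by
  have h1 : Nat.find hEx' ≤ Nat.find hEx + 1 :=
    Nat.find_le (by rw [hs]; exact Nat.find_spec hEx)
  have h2 : Nat.find hEx + 1 ≤ Nat.find hEx' := by
    rcases hfp : Nat.find hEx' with _ | t
    · have := Nat.find_spec hEx'
      rw [hfp, h0] at this
      cases this
    · have hQt : (pvPath nums p t a || pvPath nums p t b) = true := by
        have h := Nat.find_spec hEx'
        rw [hfp, hs] at h
        exact h
      have hle := Nat.find_le (h := hEx) hQt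
      omega
  have : Nat.find hEx' = Nat.find hEx + 1 := le_antisymm h1 h2
  rw [this]
  push_cast
  ring

lemma pv_answer_none (nums : List Int) (p a b x : Int)
    (h0 : pvPath nums p 0 x = false)
    (hs : ∀ s : Nat, pvPath nums p (s + 1) x =
      (pvPath nums p s a || pvPath nums p s b))
    (hnEx : ¬ ∃ m, (pvPath nums p m a || pvPath nums p m b) = true) :
    ¬ ∃ s, pvPath nums p s x = true := by
  rintro ⟨s, hspec⟩
  rcases s with _ | t
  · rw [h0] at hspec; cases hspec
  · rw [hs] at hspec
    exact hnEx ⟨t, hspec⟩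

-- ===== VERDICT (by name: the statement is the Claim_ definition above) =====
theorem solve_spec : Claim_equal_solve := by
  unfold Claim_equal_solve
  intro nums _
  unfold Spec_solve solve solve_alt
  rw [PySem.List.foldl_append_singleton_eq_map]
  simp only [List.nil_append]
  -- characterise one q-round of B from its initial state
  have hloop : ∀ (q p : Int), p + q = 1 → (q = 0 ∨ q = 1) →
      ∀ (res₀ : PySem.Dict Int Int) (x : Int),
      (solveRound nums (nums.length : Int)
        ((PySem.List.pyRange 0 (nums.length : Int) 1).filter
          (fun i => PySem.Int.mod ((PySem.List.pyGet? nums i).getD 0) 2 != q))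
        (PySem.Set.ofList ((PySem.List.pyRange 0 (nums.length : Int) 1).filter
          (fun i => PySem.Int.mod ((PySem.List.pyGet? nums i).getD 0) 2 == q)))
        res₀ 0).get? x =
      @dite (Option Int) (pvExp nums p x = true ∧ pvR nums p 0 x = false ∧
          (∃ s, pvPath nums p s x = true)) (Classical.dec _)
        (fun h => some ((Nat.find h.2.2 : Int)))
        (fun _ => res₀.get? x) := by
    intro q p hpq hq res₀ x
    have hR0 : ∀ y : Int, pvR nums p 0 y = pvPath nums p 0 y := by
      intro y
      simp [pvR, List.range_one]
    have hset : ∀ y : Int,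
        y ∈ PySem.Set.ofList ((PySem.List.pyRange 0 (nums.length : Int) 1).filter
          (fun i => PySem.Int.mod ((PySem.List.pyGet? nums i).getD 0) 2 == q)) ↔
        pvR nums p 0 y = true := by
      intro y
      rw [PySem.Set.mem_ofList, List.mem_filter, PySem.List.mem_pyRange_one, hR0]
      show _ ↔ pvTgt nums p y = true
      simp only [pvTgt, pvInB, pvVal, Bool.and_eq_true_iff, decide_eq_true_eq,
        beq_iff_eq, bne_iff_ne, ne_eq]
      rcases pvMod2_cases ((PySem.List.pyGet? nums y).getD 0) with hm | hm <;>
        rcases hq with rfl | rfl <;>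
        constructor <;> rintro ⟨⟨h1, h2⟩, h3⟩ <;> refine ⟨⟨h1, h2⟩, ?_⟩ <;> omega
    have hpend : ((PySem.List.pyRange 0 (nums.length : Int) 1).filter
        (fun i => PySem.Int.mod ((PySem.List.pyGet? nums i).getD 0) 2 != q)) =
        (PySem.List.pyRange 0 (nums.length : Int) 1).filter
          (fun i => (PySem.Int.mod (pvVal nums i) 2 != q) && !(pvR nums p 0 i)) := by
      apply List.filter_congr
      intro y hy
      rw [PySem.List.mem_pyRange_one] at hy
      rw [hR0]
      show _ = (_ && !(pvTgt nums p y))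
      simp only [pvTgt, pvInB, pvVal, bne_iff_ne, ne_eq, Bool.and_eq_true_iff,
        decide_eq_true_eq, beq_iff_eq]
      rcases hm : (PySem.Int.mod ((PySem.List.pyGet? nums y).getD 0) 2 != q) with _ | _
      · simp
      · have hne : PySem.Int.mod ((PySem.List.pyGet? nums y).getD 0) 2 ≠ q := by
          rw [bne_iff_ne] at hm
          exact hm
        have hmp : PySem.Int.mod ((PySem.List.pyGet? nums y).getD 0) 2 = p := by
          rcases pvMod2_cases ((PySem.List.pyGet? nums y).getD 0) with h | h <;>
            rcases hq with rfl | rfl <;> omega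
        have hbne : (PySem.Int.mod ((PySem.List.pyGet? nums y).getD 0) 2 != p) = false := by
          simp only [bne_eq_false_iff_eq, beq_iff_eq]
          exact hmp
        rw [hbne]
        simp
    exact pv_roundLoop_spec nums q p hpq hq 0
      _ _ res₀ hset hpend x
  apply List.ext_getElem
  · simp [PySem.List.length_enumerate, PySem.List.length_pyRange_one]
  intro k h1 h2
  simp only [List.getElem_map, PySem.List.getElem_enumerate,
    PySem.List.getElem_pyRange_one, zero_add]
  have hkl : k < nums.length := by
    simpa [PySem.List.length_enumerate] using h1
  have hv : PySem.List.pyGet? nums (k : Int) = some nums[k] := by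
    rw [PySem.List.pyGet?_natCast]
    exact List.getElem?_eq_getElem hkl
  rw [pv_solveBFS_spec nums (k : Int) nums[k] hv]
  simp only [List.foldl_cons, List.foldl_nil]
  rw [hloop 1 0 (by ring) (Or.inr rfl), hloop 0 1 (by ring) (Or.inl rfl)]
  have hinBk : pvInB nums (k : Int) = true := by
    simp only [pvInB, Bool.and_eq_true_iff, decide_eq_true_eq]
    constructor
    · omega
    · exact_mod_cast hkl
  have hvalk : pvVal nums (k : Int) = nums[k] := by simp [pvVal, hv]
  have hempty : (PySem.Dict.mk ([] : List (Int × Int))).get? (k : Int) = none := rfl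
  rcases pvMod2_cases nums[k] with hpk | hpk <;> rw [hpk]
  · -- even value: settled by the q = 1 round (target parity 1, start parity p = 0)
    have hexp0 : pvExp nums 0 (k : Int) = true := by
      simp only [pvExp, hinBk, hvalk, Bool.true_and, beq_iff_eq]
      exact hpk
    have htgt0 : pvTgt nums 0 (k : Int) = false := by
      simp only [pvTgt, hvalk]
      rw [show (PySem.Int.mod nums[k] 2 != 0) = false by
        simp only [bne_eq_false_iff_eq, beq_iff_eq]; exact hpk]
      simp
    have h0 : pvPath nums 0 0 (k : Int) = false := htgt0
    have hR00 : pvR nums 0 0 (k : Int) = false := by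
      simp only [pvR]
      rw [show (0 : Nat) + 1 = 1 from rfl, List.range_one]
      simp only [List.any_cons, List.any_nil, Bool.or_false]
      exact h0
    have hs : ∀ s : Nat, pvPath nums 0 (s + 1) (k : Int) =
        (pvPath nums 0 s ((k : Int) + nums[k]) || pvPath nums 0 s ((k : Int) - nums[k])) := by
      intro s
      simp [pvPath, hexp0, hvalk]
    have hexp1 : pvExp nums 1 (k : Int) = false := by
      simp only [pvExp, hvalk, hpk]
      simp
    by_cases hEx : ∃ m, (pvPath nums 0 m ((k : Int) + nums[k])
        || pvPath nums 0 m ((k : Int) - nums[k])) = true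
    · have hEx' : ∃ s, pvPath nums 0 s (k : Int) = true :=
        ⟨Nat.find hEx + 1, by rw [hs]; exact Nat.find_spec hEx⟩
      rw [dif_pos hEx, dif_pos ⟨hexp0, hR00, hEx'⟩]
      have hshift := pv_answer_shift nums 0 ((k : Int) + nums[k]) ((k : Int) - nums[k])
        (k : Int) h0 hs hEx hEx'
      simp [hshift]
    · rw [dif_neg hEx]
      rw [dif_neg (fun h => pv_answer_none nums 0 _ _ _ h0 hs hEx h.2.2)]
      rw [dif_neg (by rintro ⟨h, -, -⟩; rw [hexp1] at h; cases h)]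
      rw [hempty]
      rfl
  · -- odd value: falls through the q = 1 round and is settled by the q = 0 round (p = 1)
    have hexp0 : pvExp nums 0 (k : Int) = false := by
      simp only [pvExp, hvalk, hpk]
      simp
    have houter : ¬ (pvExp nums 0 (k : Int) = true ∧ pvR nums 0 0 (k : Int) = false ∧
        (∃ s, pvPath nums 0 s (k : Int) = true)) := by
      rintro ⟨h, -, -⟩
      rw [hexp0] at h
      cases h
    have hexp1 : pvExp nums 1 (k : Int) = true := by
      simp only [pvExp, hinBk, hvalk, Bool.true_and, beq_iff_eq]
      exact hpk
    have htgt1 : pvTgt nums 1 (k : Int) = false := by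
      simp only [pvTgt, hvalk]
      rw [show (PySem.Int.mod nums[k] 2 != 1) = false by
        simp only [bne_eq_false_iff_eq, beq_iff_eq]; exact hpk]
      simp
    have h0 : pvPath nums 1 0 (k : Int) = false := htgt1
    have hR01 : pvR nums 1 0 (k : Int) = false := by
      simp only [pvR]
      rw [show (0 : Nat) + 1 = 1 from rfl, List.range_one]
      simp only [List.any_cons, List.any_nil, Bool.or_false]
      exact h0
    have hs : ∀ s : Nat, pvPath nums 1 (s + 1) (k : Int) =
        (pvPath nums 1 s ((k : Int) + nums[k]) || pvPath nums 1 s ((k : Int) - nums[k])) := by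
      intro s
      simp [pvPath, hexp1, hvalk]
    by_cases hEx : ∃ m, (pvPath nums 1 m ((k : Int) + nums[k])
        || pvPath nums 1 m ((k : Int) - nums[k])) = true
    · have hEx' : ∃ s, pvPath nums 1 s (k : Int) = true :=
        ⟨Nat.find hEx + 1, by rw [hs]; exact Nat.find_spec hEx⟩
      rw [dif_pos hEx, dif_neg houter, dif_pos ⟨hexp1, hR01, hEx'⟩]
      have hshift := pv_answer_shift nums 1 ((k : Int) + nums[k]) ((k : Int) - nums[k])
        (k : Int) h0 hs hEx hEx'
      simp [hshift]
    · rw [dif_neg hEx, dif_neg houter]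
      rw [dif_neg (fun h => pv_answer_none nums 1 _ _ _ h0 hs hEx h.2.2)]
      rw [hempty]
      rfl
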